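-- pv_equiv track=rewrite | github.com/pkaramon/algorithms-and-data-structures-coursework | graphs/revision/exercises/good_begining.py | find_good_beginning_in_dag
-- ===== SOURCE A (Python) =====
-- def find_good_beginning_in_dag(graph):
--     n = len(graph)
--     processed = []
--     visited = [False for _ in range(n)]
--
--     for v in range(n):
--         if not visited[v]:
--             dfs_visit(v, graph, visited, processed)
--
--     sccs = get_sccs(graph, processed)
--     scc_ids = [-1] * n
--     for i, scc in enumerate(sccs):
--         for v in scc:
--             scc_ids[v] = i
--
--     # there are duplicate edges in this edges
--     # I know that and don't care
--     scc_graph = create_scc_graph(graph, scc_ids, sccs)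
--     topo_sorted = []
--     dfs_visit(0, scc_graph, [False] * len(scc_graph), topo_sorted)
--     topo_sorted.reverse()
--
--     for v in range(n):
--         if scc_ids[v] == topo_sorted[0]:
--             return True, v
--
-- def create_scc_graph(graph, scc_ids, sccs):
--     n = len(graph)
--     for i, scc in enumerate(sccs):
--         for v in scc:
--             scc_ids[v] = i
--     scc_graph = [[] for _ in range(len(sccs))]
--     for v in range(n):
--         for u in graph[v]:
--             if scc_ids[v] != scc_ids[u]:
--                 scc_graph[scc_ids[v]].append(scc_ids[u])
--     return scc_graph
--
-- def get_sccs(graph, processed):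
--     n = len(graph)
--     visited = [False for _ in range(n)]
--     sccs = []
--     transpose = create_transpose_graph(graph)
--     for v in reversed(processed):
--         if not visited[v]:
--             scc = []
--             dfs_visit(v, transpose, visited, scc)
--             sccs.append(scc)
--     return sccs
--
-- def dfs_visit(v, graph, visited, output):
--     visited[v] = True
--     for u in graph[v]:
--         if not visited[u]:
--             dfs_visit(u, graph, visited, output)
--     output.append(v)
--
-- def create_transpose_graph(graph):
--     n = len(graph)
--     transpose = [[] for _ in range(n)]
--     for v in range(n):
--         for u in graph[v]:
--             transpose[u].append(v)
--     return transpose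
-- ===== SOURCE B (Python) =====
-- def find_good_beginning_in_dag(graph):
--     n = len(graph)
--     visited = [False] * n
--     order = []
--
--     def visit(v):
--         visited[v] = True
--         for u in graph[v]:
--             if not visited[u]:
--                 visit(u)
--         order.append(v)
--
--     for v in range(n):
--         if not visited[v]:
--             visit(v)
--
--     r = order[-1]
--     # vertices that can reach r = the source SCC picked by Kosaraju's second
--     # pass; computed as a backward-reachability fixpoint, no transpose graph,
--     # no SCC list, no condensation, no topological sort.
--     in_scc = [False] * n
--     in_scc[r] = True
--     changed = True
--     while changed:
--         changed = False
--         for v in range(n):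
--             if not in_scc[v] and any(in_scc[u] for u in graph[v]):
--                 in_scc[v] = True
--                 changed = True
--     return True, in_scc.index(True)
-- ===== Notes on version B (the rewrite author's own statement) =====
-- stated objective: simpler
-- what changed: After the first DFS pass, B drops A's whole second half (transpose graph, second DFS pass collecting all SCCs, scc-id table, condensation graph and topological DFS) and instead computes the set of vertices that can reach the last-finished vertex by a backward-reachability fixpoint iteration, returning the smallest index in that set.
import Mathlib
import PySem

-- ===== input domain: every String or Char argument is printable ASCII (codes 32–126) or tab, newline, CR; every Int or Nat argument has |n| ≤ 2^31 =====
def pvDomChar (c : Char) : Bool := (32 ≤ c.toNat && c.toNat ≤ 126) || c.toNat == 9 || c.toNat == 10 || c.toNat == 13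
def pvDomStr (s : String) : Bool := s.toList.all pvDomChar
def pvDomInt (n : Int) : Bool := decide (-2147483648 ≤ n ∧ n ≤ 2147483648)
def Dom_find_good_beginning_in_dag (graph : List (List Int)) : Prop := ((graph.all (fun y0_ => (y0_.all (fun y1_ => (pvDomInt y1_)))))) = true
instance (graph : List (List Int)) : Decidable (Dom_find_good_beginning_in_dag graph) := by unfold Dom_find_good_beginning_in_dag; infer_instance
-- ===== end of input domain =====

-- B replaces A's transpose/second-DFS/condensation/topological-sort half by a direct
-- backward-reachability fixpoint from the last-finished vertex (objective: simpler).
-- Python A mutates nothing observable to the caller; equivalence is about the return value.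

-- ===== PORT A =====

-- Python list indexing with a possibly negative index i on a list of length n:
-- under Pre_ every index used is in [-n, n), where this normalisation is exact.
def pvNidx (n : Nat) (v : Int) : Nat := (if v < 0 then v + (n : Int) else v).toNat

-- visited[i] read; exact for i < length (Pre_ keeps all reads in range).
def pvGetB (vis : List Bool) (i : Nat) : Bool := vis.getD i false

-- dfs_visit(v, graph, visited, output): returns the (visited, output) pair instead of
-- mutating; fuel bounds the recursion depth (depth ≤ number of unvisited vertices, so
-- the fuel `n+1` passed at every call site is never exhausted on inputs in Pre_).
mutual
def pvDfs (fuel : Nat) (g : List (List Int)) (v : Int) (vis : List Bool) (out : List Int) :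
    List Bool × List Int :=
  match fuel with
  | 0 => (vis, out)
  | fuel + 1 =>
    let vi := pvNidx g.length v
    let st := pvDfsL fuel g (g.getD vi []) (vis.set vi true) out
    (st.1, st.2.concat v)
termination_by (fuel, 0)

def pvDfsL (fuel : Nat) (g : List (List Int)) (l : List Int) (vis : List Bool) (out : List Int) :
    List Bool × List Int :=
  match l with
  | [] => (vis, out)
  | u :: us =>
    if pvGetB vis (pvNidx g.length u) then pvDfsL fuel g us vis out
    else
      let st := pvDfs fuel g u vis out
      pvDfsL fuel g us st.1 st.2
termination_by (fuel, l.length + 1)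
end

-- the first loop of A (and of B): for v in range(n): if not visited[v]: dfs_visit(...)
def pvPass1 (g : List (List Int)) : List Bool × List Int :=
  (List.range g.length).foldl
    (fun st v => if pvGetB st.1 v then st else pvDfs (g.length + 1) g (v : Int) st.1 st.2)
    (List.replicate g.length false, [])

def pvTranspose (g : List (List Int)) : List (List Int) :=
  (List.range g.length).foldl
    (fun tg v =>
      (g.getD v []).foldl
        (fun tg u =>
          tg.set (pvNidx g.length u) ((tg.getD (pvNidx g.length u) []).concat (v : Int))) tg)
    (List.replicate g.length [])

def pvGetSccs (g : List (List Int)) (processed : List Int) : List (List Int) :=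
  let tg := pvTranspose g
  (processed.reverse.foldl
    (fun (st : List Bool × List (List Int)) v =>
      if pvGetB st.1 (pvNidx g.length v) then st
      else
        let r := pvDfs (g.length + 1) tg v st.1 []
        (r.1, st.2.concat r.2))
    (List.replicate g.length false, [])).2

-- create_scc_graph also re-assigns scc_ids in place (with the identical values); the
-- port returns the (scc_ids, scc_graph) pair to mirror that mutation.
def pvCreateSccGraph (g : List (List Int)) (ids0 : List Int) (sccs : List (List Int)) :
    List Int × List (List Int) :=
  let n := g.length
  let ids := (PySem.List.enumerate sccs).foldl
    (fun ids p => p.2.foldl (fun ids v => ids.set (pvNidx n v) p.1) ids) ids0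
  let m := sccs.length
  let sg := (List.range n).foldl
    (fun sg v =>
      (g.getD v []).foldl
        (fun sg u =>
          if ids.getD v (-1) ≠ ids.getD (pvNidx n u) (-1) then
            let iv := pvNidx m (ids.getD v (-1))
            sg.set iv ((sg.getD iv []).concat (ids.getD (pvNidx n u) (-1)))
          else sg) sg)
    (List.replicate m [])
  (ids, sg)

def find_good_beginning_in_dag (graph : List (List Int)) : Bool × Int :=
  let n := graph.length
  let processed := (pvPass1 graph).2
  let sccs := pvGetSccs graph processed
  let ids0 := (PySem.List.enumerate sccs).foldl
    (fun ids p => p.2.foldl (fun ids v => ids.set (pvNidx n v) p.1) ids)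
    (List.replicate n (-1))
  let pr := pvCreateSccGraph graph ids0 sccs
  let topo := ((pvDfs (pr.2.length + 1) pr.2 0 (List.replicate pr.2.length false) []).2).reverse
  match (List.range n).find? (fun v => pr.1.getD v (-1) == topo.getD 0 (-1)) with
  | some v => (true, (v : Int))
  | none => (false, 0)    -- Python returns None here; unreachable on inputs in Pre_

-- ===== PORT B =====

-- one round of the while-loop body: for v in range(n): if not in_scc[v] and any(...): ...
def pvFixRound (g : List (List Int)) (s : List Bool) : List Bool × Bool :=
  (List.range g.length).foldl
    (fun st v =>
      if !pvGetB st.1 v && (g.getD v []).any (fun u => pvGetB st.1 (pvNidx g.length u)) then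
        (st.1.set v true, true)
      else st)
    (s, false)

-- while changed: ... ; fuel n+1 is never exhausted (each changed round marks a vertex).
def pvFixLoop (g : List (List Int)) : Nat → List Bool → List Bool
  | 0, s => s
  | fuel + 1, s =>
    let r := pvFixRound g s
    if r.2 then pvFixLoop g fuel r.1 else r.1

def find_good_beginning_in_dag_alt (graph : List (List Int)) : Bool × Int :=
  let n := graph.length
  let processed := (pvPass1 graph).2
  let r := processed.getD (processed.length - 1) 0   -- order[-1]; Python raises on n = 0, excluded by Pre_
  let s0 := (List.replicate n false).set (pvNidx n r) true
  let s := pvFixLoop graph (n + 1) s0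
  match (List.range n).find? (fun v => pvGetB s v) with
  | some v => (true, (v : Int))
  | none => (true, 0)    -- in_scc.index(True); unreachable on inputs in Pre_

-- ===== PRECONDITION & SPEC =====

-- Pre_ excludes exactly the inputs on which the Python A raises IndexError: the empty
-- graph, and any edge target outside [-n, n) (Python list indexing rejects those).
def Pre_find_good_beginning_in_dag (graph : List (List Int)) : Prop :=
  graph ≠ [] ∧ ∀ row ∈ graph, ∀ e ∈ row,
    -(graph.length : Int) ≤ e ∧ e < (graph.length : Int)

instance (graph : List (List Int)) : Decidable (Pre_find_good_beginning_in_dag graph) := by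
  unfold Pre_find_good_beginning_in_dag; infer_instance

def pvWitness_find_good_beginning_in_dag : List (List Int) := [[1], [0, -2]]

def Spec_find_good_beginning_in_dag (graph : List (List Int)) (out : Bool × Int) : Prop :=
  out = find_good_beginning_in_dag_alt graph

instance (graph : List (List Int)) (out : Bool × Int) :
    Decidable (Spec_find_good_beginning_in_dag graph out) := by
  unfold Spec_find_good_beginning_in_dag; infer_instance

-- ===== CLAIM (what is proved, stated in full; the proofs are below) =====
def Claim_equal_find_good_beginning_in_dag : Prop :=
  ∀ (graph : List (List Int)), Dom_find_good_beginning_in_dag graph →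
    Pre_find_good_beginning_in_dag graph →
    Spec_find_good_beginning_in_dag graph (find_good_beginning_in_dag graph)

-- ===== LEMMAS AND PROOFS =====

-- all edge values are legal Python indices for a list of length n
def pvEdgesOk (g : List (List Int)) : Prop :=
  ∀ row ∈ g, ∀ e ∈ row, -(g.length : Int) ≤ e ∧ e < (g.length : Int)

-- the edge relation actually traversed (indices normalised)
def pvGStep (g : List (List Int)) (a b : Nat) : Prop :=
  ∃ e ∈ g.getD a [], pvNidx g.length e = b

-- number of unvisited indices below n
def pvFc (n : Nat) (s : List Bool) : Nat := (List.range n).countP (fun i => !pvGetB s i)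

theorem pvNidx_lt {n : Nat} {e : Int} (h1 : -(n : Int) ≤ e) (h2 : e < (n : Int)) :
    pvNidx n e < n := by
  unfold pvNidx; split <;> omega

theorem pvNidx_natCast (n k : Nat) : pvNidx n (k : Int) = k := by
  unfold pvNidx; split <;> omega

theorem pvGetB_set_self {s : List Bool} {i : Nat} (h : i < s.length) (b : Bool) :
    pvGetB (s.set i b) i = b := by
  simp [pvGetB, List.getD, h]

theorem pvGetB_set_ne {s : List Bool} {i j : Nat} (h : i ≠ j) (b : Bool) :
    pvGetB (s.set i b) j = pvGetB s j := by
  simp [pvGetB, List.getD, List.getElem?_set_ne h]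

theorem pvGetB_replicate (n j : Nat) : pvGetB (List.replicate n false) j = false := by
  simp [pvGetB, List.getD]

theorem pvGetD_mem {g : List (List Int)} {a : Nat} (h : a < g.length) : g.getD a [] ∈ g := by
  rw [List.getD_eq_getElem g [] h]; exact List.getElem_mem h

theorem pvGetD_nil {g : List (List Int)} {a : Nat} (h : g.length ≤ a) : g.getD a [] = [] := by
  simp [List.getD, List.getElem?_eq_none h]

theorem pvEdge_lt {g : List (List Int)} (hE : pvEdgesOk g) {a : Nat} {e : Int}
    (he : e ∈ g.getD a []) : pvNidx g.length e < g.length := by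
  by_cases h : a < g.length
  · obtain ⟨h1, h2⟩ := hE _ (pvGetD_mem h) e he
    exact pvNidx_lt h1 h2
  · rw [pvGetD_nil (by omega)] at he; cases he

theorem pvGStep_lt {g : List (List Int)} {a b : Nat} (h : pvGStep g a b) : a < g.length := by
  obtain ⟨e, he, _⟩ := h
  by_contra hc
  rw [pvGetD_nil (by omega)] at he; cases he

theorem pvFc_pos {n : Nat} {s : List Bool} {j : Nat} (hj : j < n) (h : pvGetB s j = false) :
    0 < pvFc n s := by
  apply List.countP_pos_iff.mpr
  exact ⟨j, List.mem_range.mpr hj, by simp [h]⟩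

theorem pvFc_le {n : Nat} {s t : List Bool} (h : ∀ j, pvGetB s j = true → pvGetB t j = true) :
    pvFc n t ≤ pvFc n s := by
  apply List.countP_mono_left
  intro a _ ha
  simp only [Bool.not_eq_eq_eq_not, Bool.not_true] at ha ⊢
  by_contra hc
  have := h a (by revert hc; cases pvGetB s a <;> simp)
  rw [this] at ha; cases ha

theorem pvFc_set_lt {n : Nat} {s : List Bool} {j : Nat} (hj : j < n) (hjl : j < s.length)
    (h : pvGetB s j = false) : pvFc n (s.set j true) < pvFc n s := by
  induction n with
  | zero => omega
  | succ m ih =>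
    unfold pvFc
    rw [List.range_succ, List.countP_append, List.countP_append]
    by_cases hjm : j = m
    · subst hjm
      have h1 : ∀ i, i < j → pvGetB (s.set j true) i = pvGetB s i := by
        intro i hi; exact pvGetB_set_ne (by omega) true
      have hc : (List.range j).countP (fun i => !pvGetB (s.set j true) i)
          = (List.range j).countP (fun i => !pvGetB s i) := by
        apply List.countP_congr
        intro a ha
        rw [h1 a (List.mem_range.mp ha)]
      simp [hc, pvGetB_set_self hjl, h]
    · have hlt := ih (by omega)
      unfold pvFc at hlt
      have : (List.countP (fun i => !pvGetB (s.set j true) i) [m])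
          ≤ List.countP (fun i => !pvGetB s i) [m] := by
        simp [List.countP, List.countP.go, pvGetB_set_ne (show j ≠ m from hjm) true]
      omega

theorem pvFc_fresh (n : Nat) : pvFc n (List.replicate n false) = n := by
  unfold pvFc
  rw [List.countP_eq_length.mpr]
  · exact List.length_range
  · intro a _; simp [pvGetB_replicate]

-- the DFS "S"-specification: output extension, lengths, exact characterisation of the
-- final visited list, and the properties of the newly appended elements
theorem pvDfsL_S (g : List (List Int)) (hE : pvEdgesOk g) (fuel : Nat)
    (hP : ∀ (v : Int) (vis : List Bool) (out : List Int),
      vis.length = g.length → pvNidx g.length v < g.length →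
      pvGetB vis (pvNidx g.length v) = false →
      ∃ ex, (pvDfs fuel g v vis out).2 = out ++ ex
        ∧ (pvDfs fuel g v vis out).1.length = g.length
        ∧ (∀ j, pvGetB (pvDfs fuel g v vis out).1 j = true ↔
             (pvGetB vis j = true ∨ ∃ e ∈ ex, pvNidx g.length e = j))
        ∧ (∀ e ∈ ex, pvGetB vis (pvNidx g.length e) = false ∧ pvNidx g.length e < g.length
             ∧ Relation.ReflTransGen (pvGStep g) (pvNidx g.length v) (pvNidx g.length e))) :
    ∀ (l : List Int) (vis : List Bool) (out : List Int),
      vis.length = g.length → (∀ u ∈ l, pvNidx g.length u < g.length) →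
      ∃ ex, (pvDfsL fuel g l vis out).2 = out ++ ex
        ∧ (pvDfsL fuel g l vis out).1.length = g.length
        ∧ (∀ j, pvGetB (pvDfsL fuel g l vis out).1 j = true ↔
             (pvGetB vis j = true ∨ ∃ e ∈ ex, pvNidx g.length e = j))
        ∧ (∀ e ∈ ex, pvGetB vis (pvNidx g.length e) = false ∧ pvNidx g.length e < g.length
             ∧ ∃ u ∈ l, Relation.ReflTransGen (pvGStep g) (pvNidx g.length u) (pvNidx g.length e)) := by
  intro l
  induction l with
  | nil =>
    intro vis out hlen _
    exact ⟨[], by simp [pvDfsL], by simp [pvDfsL, hlen], by simp [pvDfsL], by simp⟩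
  | cons u us ih =>
    intro vis out hlen hl
    by_cases hu : pvGetB vis (pvNidx g.length u) = true
    · obtain ⟨ex, h1, h2, h3, h4⟩ := ih vis out hlen (fun x hx => hl x (by simp [hx]))
      refine ⟨ex, ?_, ?_, ?_, ?_⟩
      · simpa [pvDfsL, hu] using h1
      · simpa [pvDfsL, hu] using h2
      · intro j; simpa [pvDfsL, hu] using h3 j
      · intro e he
        obtain ⟨ha, hb, u', hu', hc⟩ := h4 e he
        exact ⟨ha, hb, u', by simp [hu'], hc⟩
    · have hu' : pvGetB vis (pvNidx g.length u) = false := by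
        revert hu; cases pvGetB vis (pvNidx g.length u) <;> simp
      obtain ⟨exV, v1, v2, v3, v4⟩ := hP u vis out hlen (hl u (by simp)) hu'
      obtain ⟨exL, l1, l2, l3, l4⟩ := ih (pvDfs fuel g u vis out).1 (pvDfs fuel g u vis out).2
        v2 (fun x hx => hl x (by simp [hx]))
      refine ⟨exV ++ exL, ?_, ?_, ?_, ?_⟩
      · rw [pvDfsL]; simp only [hu', Bool.false_eq_true, if_false]
        rw [l1, v1, List.append_assoc]
      · rw [pvDfsL]; simp only [hu', Bool.false_eq_true, if_false]; exact l2
      · intro j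
        rw [pvDfsL]; simp only [hu', Bool.false_eq_true, if_false]
        rw [l3 j, v3 j]
        constructor
        · rintro ((h | ⟨e, he, hne⟩) | ⟨e, he, hne⟩)
          · exact Or.inl h
          · exact Or.inr ⟨e, by simp [he], hne⟩
          · exact Or.inr ⟨e, by simp [he], hne⟩
        · rintro (h | ⟨e, he, hne⟩)
          · exact Or.inl (Or.inl h)
          · rcases List.mem_append.mp he with h' | h'
            · exact Or.inl (Or.inr ⟨e, h', hne⟩)
            · exact Or.inr ⟨e, h', hne⟩
      · intro e he
        rcases List.mem_append.mp he with h' | h'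
        · obtain ⟨ha, hb, hc⟩ := v4 e h'
          exact ⟨ha, hb, u, by simp, hc⟩
        · obtain ⟨ha, hb, u', hu'2, hc⟩ := l4 e h'
          refine ⟨?_, hb, u', by simp [hu'2], hc⟩
          by_contra hcon
          have : pvGetB (pvDfs fuel g u vis out).1 (pvNidx g.length e) = true := by
            rw [v3]
            exact Or.inl (by revert hcon; cases pvGetB vis (pvNidx g.length e) <;> simp)
          rw [this] at ha; cases ha

theorem pvDfs_S (g : List (List Int)) (hE : pvEdgesOk g) : ∀ (fuel : Nat),
    ∀ (v : Int) (vis : List Bool) (out : List Int),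
      vis.length = g.length → pvNidx g.length v < g.length →
      pvGetB vis (pvNidx g.length v) = false →
      ∃ ex, (pvDfs fuel g v vis out).2 = out ++ ex
        ∧ (pvDfs fuel g v vis out).1.length = g.length
        ∧ (∀ j, pvGetB (pvDfs fuel g v vis out).1 j = true ↔
             (pvGetB vis j = true ∨ ∃ e ∈ ex, pvNidx g.length e = j))
        ∧ (∀ e ∈ ex, pvGetB vis (pvNidx g.length e) = false ∧ pvNidx g.length e < g.length
             ∧ Relation.ReflTransGen (pvGStep g) (pvNidx g.length v) (pvNidx g.length e)) := by
  intro fuel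
  induction fuel with
  | zero =>
    intro v vis out hlen _ _
    exact ⟨[], by simp [pvDfs], by simp [pvDfs, hlen], by simp [pvDfs], by simp⟩
  | succ f ihf =>
    intro v vis out hlen hv hunvis
    have hQ := pvDfsL_S g hE f ihf (g.getD (pvNidx g.length v) [])
      (vis.set (pvNidx g.length v) true) out
      (by rw [List.length_set]; exact hlen)
      (fun u hu => pvEdge_lt hE hu)
    obtain ⟨exL, l1, l2, l3, l4⟩ := hQ
    have hvlen : pvNidx g.length v < vis.length := by omega
    refine ⟨exL ++ [v], ?_, ?_, ?_, ?_⟩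
    · rw [pvDfs]; simp only []
      rw [l1, List.concat_eq_append, List.append_assoc]
    · rw [pvDfs]; exact l2
    · intro j
      rw [pvDfs]; simp only []
      rw [l3 j]
      by_cases hj : j = pvNidx g.length v
      · subst hj
        rw [pvGetB_set_self hvlen]
        constructor
        · intro _; exact Or.inr ⟨v, by simp, rfl⟩
        · intro _; exact Or.inl rfl
      · rw [pvGetB_set_ne (fun h => hj h.symm) true]
        constructor
        · rintro (h | ⟨e, he, hne⟩)
          · exact Or.inl h
          · exact Or.inr ⟨e, by simp [he], hne⟩
        · rintro (h | ⟨e, he, hne⟩)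
          · exact Or.inl h
          · rcases List.mem_append.mp he with h' | h'
            · exact Or.inr ⟨e, h', hne⟩
            · simp at h'; subst h'; exact absurd hne.symm hj
    · intro e he
      rcases List.mem_append.mp he with h' | h'
      · obtain ⟨ha, hb, u', hu'2, hc⟩ := l4 e h'
        refine ⟨?_, hb, ?_⟩
        · by_cases hje : pvNidx g.length e = pvNidx g.length v
          · rw [hje, pvGetB_set_self hvlen] at ha; cases ha
          · rw [pvGetB_set_ne (fun h => hje h.symm) true] at ha; exact ha
        · refine Relation.ReflTransGen.head ⟨u', hu'2, rfl⟩ hc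
      · simp at h'; subst h'
        exact ⟨hunvis, hv, Relation.ReflTransGen.refl⟩


theorem pvDfs_mono (g : List (List Int)) (hE : pvEdgesOk g) (fuel : Nat) (v : Int)
    (vis : List Bool) (out : List Int) (hlen : vis.length = g.length)
    (hv : pvNidx g.length v < g.length) (hunvis : pvGetB vis (pvNidx g.length v) = false) :
    ∀ j, pvGetB vis j = true → pvGetB (pvDfs fuel g v vis out).1 j = true := by
  intro j hj
  obtain ⟨ex, _, _, h3, _⟩ := pvDfs_S g hE fuel v vis out hlen hv hunvis
  exact (h3 j).mpr (Or.inl hj)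

theorem pvDfsL_mono (g : List (List Int)) (hE : pvEdgesOk g) (fuel : Nat) (l : List Int)
    (vis : List Bool) (out : List Int) (hlen : vis.length = g.length)
    (hl : ∀ u ∈ l, pvNidx g.length u < g.length) :
    ∀ j, pvGetB vis j = true → pvGetB (pvDfsL fuel g l vis out).1 j = true := by
  intro j hj
  obtain ⟨ex, _, _, h3, _⟩ := pvDfsL_S g hE fuel (pvDfs_S g hE fuel) l vis out hlen hl
  exact (h3 j).mpr (Or.inl hj)

theorem pvDfs_len (g : List (List Int)) (hE : pvEdgesOk g) (fuel : Nat) (v : Int)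
    (vis : List Bool) (out : List Int) (hlen : vis.length = g.length)
    (hv : pvNidx g.length v < g.length) (hunvis : pvGetB vis (pvNidx g.length v) = false) :
    (pvDfs fuel g v vis out).1.length = g.length := by
  obtain ⟨ex, _, h2, _, _⟩ := pvDfs_S g hE fuel v vis out hlen hv hunvis
  exact h2

-- at the end of a DFS call, every vertex marked during the call has all its
-- successors marked, and the root (resp. every list entry) is marked
theorem pvDfsL_closed (g : List (List Int)) (hE : pvEdgesOk g) (fuel : Nat)
    (hP : ∀ (v : Int) (vis : List Bool) (out : List Int),
      vis.length = g.length → pvNidx g.length v < g.length →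
      pvGetB vis (pvNidx g.length v) = false → pvFc g.length vis ≤ fuel →
      pvGetB (pvDfs fuel g v vis out).1 (pvNidx g.length v) = true ∧
      (∀ a, pvGetB (pvDfs fuel g v vis out).1 a = true → pvGetB vis a = false →
        ∀ b, pvGStep g a b → pvGetB (pvDfs fuel g v vis out).1 b = true)) :
    ∀ (l : List Int) (vis : List Bool) (out : List Int),
      vis.length = g.length → (∀ u ∈ l, pvNidx g.length u < g.length) →
      pvFc g.length vis ≤ fuel →
      (∀ u ∈ l, pvGetB (pvDfsL fuel g l vis out).1 (pvNidx g.length u) = true) ∧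
      (∀ a, pvGetB (pvDfsL fuel g l vis out).1 a = true → pvGetB vis a = false →
        ∀ b, pvGStep g a b → pvGetB (pvDfsL fuel g l vis out).1 b = true) := by
  intro l
  induction l with
  | nil =>
    intro vis out hlen _ _
    refine ⟨by simp, ?_⟩
    intro a ha hna
    rw [pvDfsL] at ha
    rw [ha] at hna; cases hna
  | cons u us ih =>
    intro vis out hlen hl hfc
    by_cases hu : pvGetB vis (pvNidx g.length u) = true
    · have hrec := ih vis out hlen (fun x hx => hl x (by simp [hx])) hfc
      have hmono := pvDfsL_mono g hE fuel us vis out hlen (fun x hx => hl x (by simp [hx]))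
      constructor
      · intro x hx
        rcases List.mem_cons.mp hx with h | h
        · subst h
          simp only [pvDfsL, hu, if_true]
          exact hmono _ hu
        · simpa [pvDfsL, hu] using hrec.1 x h
      · intro a ha hna b hb
        simp only [pvDfsL, hu, if_true] at ha ⊢
        exact hrec.2 a ha hna b hb
    · have hu' : pvGetB vis (pvNidx g.length u) = false := by
        revert hu; cases pvGetB vis (pvNidx g.length u) <;> simp
      have hst := hP u vis out hlen (hl u (by simp)) hu' hfc
      set st := pvDfs fuel g u vis out with hstdef
      have hstlen : st.1.length = g.length :=
        pvDfs_len g hE fuel u vis out hlen (hl u (by simp)) hu'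
      have hstmono := pvDfs_mono g hE fuel u vis out hlen (hl u (by simp)) hu'
      have hstfc : pvFc g.length st.1 ≤ fuel :=
        le_trans (pvFc_le hstmono) hfc
      have hrec := ih st.1 st.2 hstlen (fun x hx => hl x (by simp [hx])) hstfc
      have hmono2 := pvDfsL_mono g hE fuel us st.1 st.2 hstlen
        (fun x hx => hl x (by simp [hx]))
      constructor
      · intro x hx
        rcases List.mem_cons.mp hx with h | h
        · subst h
          simp only [pvDfsL, hu', Bool.false_eq_true, if_false]
          exact hmono2 _ hst.1
        · simpa [pvDfsL, hu'] using hrec.1 x h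
      · intro a ha hna b hb
        simp only [pvDfsL, hu', Bool.false_eq_true, if_false] at ha ⊢
        by_cases hsta : pvGetB st.1 a = true
        · exact hmono2 _ (hst.2 a hsta hna b hb)
        · have hsta' : pvGetB st.1 a = false := by
            revert hsta; cases pvGetB st.1 a <;> simp
          exact hrec.2 a ha hsta' b hb

theorem pvDfs_closed (g : List (List Int)) (hE : pvEdgesOk g) : ∀ (fuel : Nat),
    ∀ (v : Int) (vis : List Bool) (out : List Int),
      vis.length = g.length → pvNidx g.length v < g.length →
      pvGetB vis (pvNidx g.length v) = false → pvFc g.length vis ≤ fuel →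
      pvGetB (pvDfs fuel g v vis out).1 (pvNidx g.length v) = true ∧
      (∀ a, pvGetB (pvDfs fuel g v vis out).1 a = true → pvGetB vis a = false →
        ∀ b, pvGStep g a b → pvGetB (pvDfs fuel g v vis out).1 b = true) := by
  intro fuel
  induction fuel with
  | zero =>
    intro v vis out hlen hv hunvis hfc
    have := pvFc_pos (s := vis) hv hunvis
    omega
  | succ f ihf =>
    intro v vis out hlen hv hunvis hfc
    set vi := pvNidx g.length v with hvi
    have hvlen : vi < vis.length := by omega
    have hfc' : pvFc g.length (vis.set vi true) ≤ f := by
      have := pvFc_set_lt hv hvlen hunvis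
      omega
    have hlen' : (vis.set vi true).length = g.length := by
      rw [List.length_set]; exact hlen
    have hQ := pvDfsL_closed g hE f ihf (g.getD vi []) (vis.set vi true) out hlen'
      (fun u hu => pvEdge_lt hE hu) hfc'
    have hmono := pvDfsL_mono g hE f (g.getD vi []) (vis.set vi true) out hlen'
      (fun u hu => pvEdge_lt hE hu)
    constructor
    · rw [pvDfs]
      exact hmono vi (pvGetB_set_self hvlen true)
    · intro a ha hna b hb
      rw [pvDfs] at ha ⊢
      by_cases hav : a = vi
      · subst hav
        obtain ⟨e, he, hne⟩ := hb
        have := hQ.1 e he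
        rwa [hne] at this
      · have hna' : pvGetB (vis.set vi true) a = false := by
          rw [pvGetB_set_ne (fun h => hav h.symm) true]; exact hna
        exact hQ.2 a ha hna' b hb

-- fresh-start DFS marks exactly the vertices reachable from the (normalised) root
theorem pvDfs_closure (g : List (List Int)) (hE : pvEdgesOk g) (fuel : Nat) (v : Int)
    (out : List Int) (hv : pvNidx g.length v < g.length) (hfuel : g.length ≤ fuel) :
    ∀ j, pvGetB (pvDfs fuel g v (List.replicate g.length false) out).1 j = true ↔
      Relation.ReflTransGen (pvGStep g) (pvNidx g.length v) j := by
  have hlen : (List.replicate g.length false).length = g.length := by simp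
  have hunvis : pvGetB (List.replicate g.length false) (pvNidx g.length v) = false :=
    pvGetB_replicate _ _
  have hfc : pvFc g.length (List.replicate g.length false) ≤ fuel := by
    rw [pvFc_fresh]; exact hfuel
  intro j
  constructor
  · intro hj
    obtain ⟨ex, _, _, h3, h4⟩ := pvDfs_S g hE fuel v _ out hlen hv hunvis
    rcases (h3 j).mp hj with h | ⟨e, he, hne⟩
    · rw [pvGetB_replicate] at h; cases h
    · obtain ⟨_, _, hr⟩ := h4 e he
      rwa [hne] at hr
  · intro hreach
    have hcl := pvDfs_closed g hE fuel v _ out hlen hv hunvis hfc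
    induction hreach with
    | refl => exact hcl.1
    | tail hab hbc ihr =>
      exact hcl.2 _ ihr (pvGetB_replicate _ _) _ hbc


theorem pvGetD_set_self {l : List (List Int)} {i : Nat} (h : i < l.length) (y : List Int) :
    (l.set i y).getD i [] = y := by
  simp [List.getD, h]

theorem pvGetD_set_ne {l : List (List Int)} {i j : Nat} (h : i ≠ j) (y : List Int) :
    (l.set i y).getD j [] = l.getD j [] := by
  simp [List.getD, List.getElem?_set_ne h]

theorem pvGetD_replicate (n a : Nat) : (List.replicate n ([] : List Int)).getD a [] = [] := by
  simp [List.getD]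

-- inner fold of create_transpose_graph: processing the adjacency list of one vertex v
theorem pvTransIn (g : List (List Int)) (v : Nat) :
    ∀ (l : List Int) (tg : List (List Int)), tg.length = g.length →
      (∀ u ∈ l, pvNidx g.length u < g.length) →
      (l.foldl (fun tg u =>
          tg.set (pvNidx g.length u) ((tg.getD (pvNidx g.length u) []).concat (v : Int))) tg).length
        = tg.length ∧
      ∀ (a : Nat) (x : Int),
        x ∈ (l.foldl (fun tg u =>
            tg.set (pvNidx g.length u) ((tg.getD (pvNidx g.length u) []).concat (v : Int))) tg).getD a []
        ↔ (x ∈ tg.getD a [] ∨ (x = (v : Int) ∧ ∃ e ∈ l, pvNidx g.length e = a)) := by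
  intro l
  induction l with
  | nil => intro tg hlen _; exact ⟨rfl, by simp⟩
  | cons u us ih =>
    intro tg hlen hl
    have hu : pvNidx g.length u < tg.length := by rw [hlen]; exact hl u (by simp)
    set tg' := tg.set (pvNidx g.length u) ((tg.getD (pvNidx g.length u) []).concat (v : Int))
      with htg'
    have hlen' : tg'.length = g.length := by rw [htg', List.length_set]; exact hlen
    obtain ⟨ihl, ihm⟩ := ih tg' hlen' (fun x hx => hl x (by simp [hx]))
    constructor
    · simp only [List.foldl_cons]
      rw [ihl, htg', List.length_set]
    · intro a x
      simp only [List.foldl_cons]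
      rw [ihm a x]
      by_cases ha : pvNidx g.length u = a
      · subst ha
        rw [htg', pvGetD_set_self hu]
        simp only [List.concat_eq_append, List.mem_append, List.mem_singleton]
        constructor
        · rintro ((h | h) | ⟨h1, e, he, h2⟩)
          · exact Or.inl h
          · exact Or.inr ⟨h, u, by simp⟩
          · exact Or.inr ⟨h1, e, by simp [he], h2⟩
        · rintro (h | ⟨h1, e, he, h2⟩)
          · exact Or.inl (Or.inl h)
          · rcases List.mem_cons.mp he with h' | h'
            · subst h'; exact Or.inl (Or.inr h1)
            · exact Or.inr ⟨h1, e, h', h2⟩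
      · rw [htg', pvGetD_set_ne ha]
        constructor
        · rintro (h | ⟨h1, e, he, h2⟩)
          · exact Or.inl h
          · exact Or.inr ⟨h1, e, by simp [he], h2⟩
        · rintro (h | ⟨h1, e, he, h2⟩)
          · exact Or.inl h
          · rcases List.mem_cons.mp he with h' | h'
            · subst h'; exact absurd h2 ha
            · exact Or.inr ⟨h1, e, h', h2⟩

theorem pvTransOut (g : List (List Int)) (hE : pvEdgesOk g) :
    ∀ (vs : List Nat) (tg : List (List Int)), tg.length = g.length →
      (vs.foldl (fun tg v =>
          (g.getD v []).foldl (fun tg u =>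
            tg.set (pvNidx g.length u) ((tg.getD (pvNidx g.length u) []).concat (v : Int))) tg)
        tg).length = tg.length ∧
      ∀ (a : Nat) (x : Int),
        x ∈ (vs.foldl (fun tg v =>
            (g.getD v []).foldl (fun tg u =>
              tg.set (pvNidx g.length u) ((tg.getD (pvNidx g.length u) []).concat (v : Int))) tg)
          tg).getD a []
        ↔ (x ∈ tg.getD a [] ∨ ∃ v ∈ vs, x = (v : Int) ∧ ∃ e ∈ g.getD v [], pvNidx g.length e = a) := by
  intro vs
  induction vs with
  | nil => intro tg hlen; exact ⟨rfl, by simp⟩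
  | cons v vs ih =>
    intro tg hlen
    obtain ⟨inl, inm⟩ := pvTransIn g v (g.getD v []) tg hlen (fun u hu => pvEdge_lt hE hu)
    set tg' := (g.getD v []).foldl (fun tg u =>
      tg.set (pvNidx g.length u) ((tg.getD (pvNidx g.length u) []).concat (v : Int))) tg with htg'
    have hlen' : tg'.length = g.length := by rw [htg', inl]; exact hlen
    obtain ⟨ihl, ihm⟩ := ih tg' hlen'
    constructor
    · simp only [List.foldl_cons]
      rw [← htg', ihl, htg', inl]
    · intro a x
      simp only [List.foldl_cons]
      rw [← htg', ihm a x, htg', inm a x]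
      constructor
      · rintro ((h | ⟨h1, h2⟩) | ⟨v', hv', h1, h2⟩)
        · exact Or.inl h
        · exact Or.inr ⟨v, by simp, h1, h2⟩
        · exact Or.inr ⟨v', by simp [hv'], h1, h2⟩
      · rintro (h | ⟨v', hv', h1, h2⟩)
        · exact Or.inl (Or.inl h)
        · rcases List.mem_cons.mp hv' with h' | h'
          · subst h'; exact Or.inl (Or.inr ⟨h1, h2⟩)
          · exact Or.inr ⟨v', h', h1, h2⟩

theorem pvTranspose_len (g : List (List Int)) (hE : pvEdgesOk g) :
    (pvTranspose g).length = g.length := by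
  unfold pvTranspose
  rw [(pvTransOut g hE (List.range g.length) _ (by simp)).1]
  simp

theorem pvTranspose_mem (g : List (List Int)) (hE : pvEdgesOk g) (a : Nat) (x : Int) :
    x ∈ (pvTranspose g).getD a [] ↔
      ∃ v : Nat, v < g.length ∧ x = (v : Int) ∧ ∃ e ∈ g.getD v [], pvNidx g.length e = a := by
  unfold pvTranspose
  rw [(pvTransOut g hE (List.range g.length) _ (by simp)).2 a x]
  rw [pvGetD_replicate]
  simp [List.mem_range]

theorem pvTranspose_EdgesOk (g : List (List Int)) (hE : pvEdgesOk g) :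
    pvEdgesOk (pvTranspose g) := by
  intro row hrow e he
  obtain ⟨i, hi, hrw⟩ := List.mem_iff_getElem.mp hrow
  have : row = (pvTranspose g).getD i [] := by
    rw [List.getD_eq_getElem _ [] hi, hrw]
  rw [this] at he
  obtain ⟨v, hv, hx, _⟩ := (pvTranspose_mem g hE i e).mp he
  subst hx
  rw [pvTranspose_len g hE]
  constructor <;> omega

theorem pvGStep_transpose (g : List (List Int)) (hE : pvEdgesOk g) (a b : Nat) :
    pvGStep (pvTranspose g) a b ↔ pvGStep g b a := by
  unfold pvGStep
  constructor
  · rintro ⟨e, he, hne⟩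
    obtain ⟨v, hv, hx, e', he', hne'⟩ := (pvTranspose_mem g hE a e).mp he
    subst hx
    rw [pvTranspose_len g hE, pvNidx_natCast] at hne
    subst hne
    exact ⟨e', he', hne'⟩
  · rintro ⟨e, he, hne⟩
    have hb : b < g.length := by
      by_contra hc
      rw [pvGetD_nil (by omega)] at he; cases he
    refine ⟨(b : Int), ?_, ?_⟩
    · exact (pvTranspose_mem g hE a (b : Int)).mpr ⟨b, hb, rfl, e, he, hne⟩
    · rw [pvTranspose_len g hE, pvNidx_natCast]


theorem pvRound_basic (g : List (List Int)) :
    ∀ (l : List Nat) (st : List Bool × Bool),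
      ((l.foldl (fun st v =>
          if !pvGetB st.1 v && (g.getD v []).any (fun u => pvGetB st.1 (pvNidx g.length u)) then
            (st.1.set v true, true)
          else st) st).1.length = st.1.length)
      ∧ (∀ j, pvGetB st.1 j = true → pvGetB (l.foldl (fun st v =>
          if !pvGetB st.1 v && (g.getD v []).any (fun u => pvGetB st.1 (pvNidx g.length u)) then
            (st.1.set v true, true)
          else st) st).1 j = true)
      ∧ (st.2 = true → (l.foldl (fun st v =>
          if !pvGetB st.1 v && (g.getD v []).any (fun u => pvGetB st.1 (pvNidx g.length u)) then
            (st.1.set v true, true)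
          else st) st).2 = true) := by
  intro l
  induction l with
  | nil => intro st; exact ⟨rfl, fun j h => h, fun h => h⟩
  | cons v vs ih =>
    intro st
    simp only [List.foldl_cons]
    by_cases hc : (!pvGetB st.1 v && (g.getD v []).any (fun u => pvGetB st.1 (pvNidx g.length u))) = true
    · rw [if_pos hc]
      obtain ⟨ih1, ih2, ih3⟩ := ih (st.1.set v true, true)
      refine ⟨by rw [ih1]; simp, ?_, fun _ => ih3 rfl⟩
      intro j hj
      apply ih2
      by_cases hjv : v = j
      · subst hjv
        simp only [Bool.and_eq_true, Bool.not_eq_eq_eq_not, Bool.not_true] at hc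
        rw [hc.1] at hj; cases hj
      · rw [pvGetB_set_ne hjv]; exact hj
    · rw [if_neg hc]; exact ih st

theorem pvRound_sound (g : List (List Int)) (R : Nat → Prop)
    (hR : ∀ a b, pvGStep g a b → R b → R a) :
    ∀ (l : List Nat) (st : List Bool × Bool), (∀ j, pvGetB st.1 j = true → R j) →
      ∀ j, pvGetB (l.foldl (fun st v =>
          if !pvGetB st.1 v && (g.getD v []).any (fun u => pvGetB st.1 (pvNidx g.length u)) then
            (st.1.set v true, true)
          else st) st).1 j = true → R j := by
  intro l
  induction l with
  | nil => intro st h j hj; exact h j hj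
  | cons v vs ih =>
    intro st h
    simp only [List.foldl_cons]
    by_cases hc : (!pvGetB st.1 v && (g.getD v []).any (fun u => pvGetB st.1 (pvNidx g.length u))) = true
    · rw [if_pos hc]
      apply ih
      intro j hj
      by_cases hjv : j = v
      · subst hjv
        simp only [Bool.and_eq_true, List.any_eq_true] at hc
        obtain ⟨_, u, hu, hmark⟩ := hc
        exact hR j (pvNidx g.length u) ⟨u, hu, rfl⟩ (h _ hmark)
      · rw [pvGetB_set_ne (fun h' => hjv h'.symm)] at hj
        exact h j hj
    · rw [if_neg hc]; exact ih st h

theorem pvRound_nochange (g : List (List Int)) :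
    ∀ (l : List Nat) (st : List Bool × Bool),
      (l.foldl (fun st v =>
          if !pvGetB st.1 v && (g.getD v []).any (fun u => pvGetB st.1 (pvNidx g.length u)) then
            (st.1.set v true, true)
          else st) st).2 = false →
      (l.foldl (fun st v =>
          if !pvGetB st.1 v && (g.getD v []).any (fun u => pvGetB st.1 (pvNidx g.length u)) then
            (st.1.set v true, true)
          else st) st).1 = st.1 ∧ st.2 = false ∧
      ∀ v ∈ l, ¬(pvGetB st.1 v = false ∧
        (g.getD v []).any (fun u => pvGetB st.1 (pvNidx g.length u)) = true) := by
  intro l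
  induction l with
  | nil => intro st h; exact ⟨rfl, h, by simp⟩
  | cons v vs ih =>
    intro st
    simp only [List.foldl_cons]
    by_cases hc : (!pvGetB st.1 v && (g.getD v []).any (fun u => pvGetB st.1 (pvNidx g.length u))) = true
    · rw [if_pos hc]
      intro hfin
      have := (pvRound_basic g vs (st.1.set v true, true)).2.2 rfl
      rw [this] at hfin; cases hfin
    · rw [if_neg hc]
      intro hfin
      obtain ⟨h1, h2, h3⟩ := ih st hfin
      refine ⟨h1, h2, ?_⟩
      intro x hx
      rcases List.mem_cons.mp hx with h' | h'
      · subst h'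
        intro ⟨ha, hb⟩
        apply hc
        simp only [ha, Bool.not_false, Bool.true_and]
        exact hb
      · exact h3 x h'

theorem pvRound_progress (g : List (List Int)) :
    ∀ (l : List Nat) (st : List Bool × Bool), (∀ v ∈ l, v < g.length) →
      st.1.length = g.length → st.2 = false →
      (l.foldl (fun st v =>
          if !pvGetB st.1 v && (g.getD v []).any (fun u => pvGetB st.1 (pvNidx g.length u)) then
            (st.1.set v true, true)
          else st) st).2 = true →
      pvFc g.length (l.foldl (fun st v =>
          if !pvGetB st.1 v && (g.getD v []).any (fun u => pvGetB st.1 (pvNidx g.length u)) then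
            (st.1.set v true, true)
          else st) st).1 < pvFc g.length st.1 := by
  intro l
  induction l with
  | nil =>
    intro st _ _ h2 hfin
    simp only [List.foldl_nil] at hfin
    rw [h2] at hfin; cases hfin
  | cons v vs ih =>
    intro st hl hlen h2
    simp only [List.foldl_cons]
    by_cases hc : (!pvGetB st.1 v && (g.getD v []).any (fun u => pvGetB st.1 (pvNidx g.length u))) = true
    · rw [if_pos hc]
      intro _
      simp only [Bool.and_eq_true, Bool.not_eq_eq_eq_not, Bool.not_true] at hc
      have hv : v < g.length := hl v (by simp)
      have hlt : pvFc g.length (st.1.set v true) < pvFc g.length st.1 :=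
        pvFc_set_lt hv (by omega) hc.1
      have hle : pvFc g.length (vs.foldl _ (st.1.set v true, true)).1
          ≤ pvFc g.length (st.1.set v true) :=
        pvFc_le ((pvRound_basic g vs (st.1.set v true, true)).2.1)
      omega
    · rw [if_neg hc]
      exact ih st (fun x hx => hl x (by simp [hx])) hlen h2


theorem pvFR_len (g : List (List Int)) (s : List Bool) :
    (pvFixRound g s).1.length = s.length :=
  (pvRound_basic g (List.range g.length) (s, false)).1

theorem pvFR_mono (g : List (List Int)) (s : List Bool) :
    ∀ j, pvGetB s j = true → pvGetB (pvFixRound g s).1 j = true :=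
  (pvRound_basic g (List.range g.length) (s, false)).2.1

theorem pvFR_sound (g : List (List Int)) (R : Nat → Prop)
    (hR : ∀ a b, pvGStep g a b → R b → R a) (s : List Bool)
    (h : ∀ j, pvGetB s j = true → R j) :
    ∀ j, pvGetB (pvFixRound g s).1 j = true → R j :=
  pvRound_sound g R hR (List.range g.length) (s, false) h

theorem pvFR_nochange (g : List (List Int)) (s : List Bool)
    (h : (pvFixRound g s).2 = false) :
    (pvFixRound g s).1 = s ∧
    ∀ v ∈ List.range g.length, ¬(pvGetB s v = false ∧
      (g.getD v []).any (fun u => pvGetB s (pvNidx g.length u)) = true) := by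
  have h' := pvRound_nochange g (List.range g.length) (s, false) h
  exact ⟨h'.1, h'.2.2⟩

theorem pvFR_progress (g : List (List Int)) (s : List Bool) (hlen : s.length = g.length)
    (h : (pvFixRound g s).2 = true) :
    pvFc g.length (pvFixRound g s).1 < pvFc g.length s :=
  pvRound_progress g (List.range g.length) (s, false) (fun v hv => List.mem_range.mp hv)
    hlen rfl h

theorem pvFixLoop_mono (g : List (List Int)) :
    ∀ (fuel : Nat) (s : List Bool) (j : Nat), pvGetB s j = true →
      pvGetB (pvFixLoop g fuel s) j = true := by
  intro fuel
  induction fuel with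
  | zero => intro s j h; exact h
  | succ f ih =>
    intro s j h
    rw [pvFixLoop]
    have hmono := pvFR_mono g s j h
    by_cases hch : (pvFixRound g s).2 = true
    · rw [if_pos hch]; exact ih _ j hmono
    · rw [if_neg hch]; exact hmono

theorem pvFixLoop_sound (g : List (List Int)) (R : Nat → Prop)
    (hR : ∀ a b, pvGStep g a b → R b → R a) :
    ∀ (fuel : Nat) (s : List Bool), (∀ j, pvGetB s j = true → R j) →
      ∀ j, pvGetB (pvFixLoop g fuel s) j = true → R j := by
  intro fuel
  induction fuel with
  | zero => intro s h j hj; exact h j hj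
  | succ f ih =>
    intro s h j
    rw [pvFixLoop]
    have hsound := pvFR_sound g R hR s h
    by_cases hch : (pvFixRound g s).2 = true
    · rw [if_pos hch]; exact ih _ hsound j
    · rw [if_neg hch]; exact hsound j

theorem pvFc_le_n (n : Nat) (s : List Bool) : pvFc n s ≤ n := by
  unfold pvFc
  calc (List.range n).countP _ ≤ (List.range n).length := List.countP_le_length
  _ = n := List.length_range

theorem pvFixLoop_fix (g : List (List Int)) :
    ∀ (fuel : Nat) (s : List Bool), s.length = g.length → pvFc g.length s < fuel →
      pvFixRound g (pvFixLoop g fuel s) = (pvFixLoop g fuel s, false) := by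
  intro fuel
  induction fuel with
  | zero => intro s _ h; omega
  | succ f ih =>
    intro s hlen hfc
    rw [pvFixLoop]
    by_cases hch : (pvFixRound g s).2 = true
    · rw [if_pos hch]
      have hprog := pvFR_progress g s hlen hch
      have hlen' := pvFR_len g s
      exact ih (pvFixRound g s).1 (by rw [hlen']; exact hlen) (by omega)
    · rw [if_neg hch]
      have hch' : (pvFixRound g s).2 = false := by
        revert hch; cases (pvFixRound g s).2 <;> simp
      have h1 : (pvFixRound g s).1 = s := (pvFR_nochange g s hch').1
      rw [h1]
      rw [show pvFixRound g s = ((pvFixRound g s).1, (pvFixRound g s).2) from rfl, h1, hch']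

-- the fixpoint loop started from {r0} computes exactly the set of vertices that
-- can reach r0 along the (normalised) edge relation
theorem pvFix_iff (g : List (List Int)) (r0 : Nat) (hr0 : r0 < g.length) :
    ∀ j, pvGetB (pvFixLoop g (g.length + 1) ((List.replicate g.length false).set r0 true)) j = true
      ↔ Relation.ReflTransGen (pvGStep g) j r0 := by
  set s0 := (List.replicate g.length false).set r0 true with hs0
  have hs0len : s0.length = g.length := by rw [hs0, List.length_set]; simp
  have hs0get : ∀ j, pvGetB s0 j = true ↔ j = r0 := by
    intro j
    by_cases hj : j = r0
    · subst hj
      rw [hs0, pvGetB_set_self (by simp; omega) true]; simp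
    · rw [hs0, pvGetB_set_ne (fun h => hj h.symm) true, pvGetB_replicate]
      simp [hj]
  have hfc : pvFc g.length s0 < g.length + 1 := by
    have := pvFc_le_n g.length s0; omega
  set S := pvFixLoop g (g.length + 1) s0 with hS
  have hfix := pvFixLoop_fix g (g.length + 1) s0 hs0len hfc
  intro j
  constructor
  · intro hj
    refine pvFixLoop_sound g (fun a => Relation.ReflTransGen (pvGStep g) a r0)
      (fun a b hab hb => Relation.ReflTransGen.head hab hb) (g.length + 1) s0 ?_ j hj
    intro x hx
    rw [(hs0get x).mp hx]
  · intro hreach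
    induction hreach using Relation.ReflTransGen.head_induction_on with
    | refl => exact pvFixLoop_mono g (g.length + 1) s0 r0 ((hs0get r0).mpr rfl)
    | head hab hbc ihb =>
      rename_i a c
      by_contra ha
      have ha' : pvGetB S a = false := by revert ha; cases pvGetB S a <;> simp
      have hnc := pvFR_nochange g S (by rw [hfix])
      have hcond := hnc.2 a (List.mem_range.mpr (pvGStep_lt hab))
      obtain ⟨e, he, hne⟩ := hab
      have : (g.getD a []).any (fun u => pvGetB S (pvNidx g.length u)) = true :=
        List.any_eq_true.mpr ⟨e, he, by rw [hne]; exact ihb⟩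
      exact hcond ⟨ha', this⟩


theorem pvGetI_set_self {l : List Int} {i : Nat} (h : i < l.length) (y : Int) :
    (l.set i y).getD i (-1) = y := by
  simp [List.getD, h]

theorem pvGetI_set_ne {l : List Int} {i j : Nat} (h : i ≠ j) (y : Int) :
    (l.set i y).getD j (-1) = l.getD j (-1) := by
  simp [List.getD, List.getElem?_set_ne h]

theorem pvGetI_replicate (n j : Nat) : (List.replicate n (-1 : Int)).getD j (-1) = -1 := by
  simp [List.getD]

theorem pvAssign_len (n : Nat) (i : Int) :
    ∀ (scc : List Int) (ids : List Int),
      (scc.foldl (fun ids v => ids.set (pvNidx n v) i) ids).length = ids.length := by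
  intro scc
  induction scc with
  | nil => intro ids; rfl
  | cons v vs ih => intro ids; simp only [List.foldl_cons]; rw [ih]; simp

theorem pvAssign_untouched (n : Nat) (i : Int) (j : Nat) :
    ∀ (scc : List Int) (ids : List Int), (∀ e ∈ scc, pvNidx n e ≠ j) →
      (scc.foldl (fun ids v => ids.set (pvNidx n v) i) ids).getD j (-1) = ids.getD j (-1) := by
  intro scc
  induction scc with
  | nil => intro ids _; rfl
  | cons v vs ih =>
    intro ids h
    simp only [List.foldl_cons]
    rw [ih _ (fun e he => h e (by simp [he])), pvGetI_set_ne (h v (by simp)) i]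

theorem pvAssign_cases (n : Nat) (i : Int) (j : Nat) :
    ∀ (scc : List Int) (ids : List Int),
      (scc.foldl (fun ids v => ids.set (pvNidx n v) i) ids).getD j (-1) = ids.getD j (-1) ∨
      (scc.foldl (fun ids v => ids.set (pvNidx n v) i) ids).getD j (-1) = i := by
  intro scc
  induction scc with
  | nil => intro ids; exact Or.inl rfl
  | cons v vs ih =>
    intro ids
    simp only [List.foldl_cons]
    rcases ih (ids.set (pvNidx n v) i) with h | h
    · rw [h]
      by_cases hv : pvNidx n v = j
      · subst hv
        by_cases hlt : pvNidx n v < ids.length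
        · exact Or.inr (pvGetI_set_self hlt i)
        · rw [List.set_eq_of_length_le (by omega)]
          exact Or.inl rfl
      · rw [pvGetI_set_ne hv i]; exact Or.inl rfl
    · exact Or.inr h

theorem pvAssign_self (n : Nat) (i : Int) (j : Nat) :
    ∀ (scc : List Int) (ids : List Int), j < ids.length → (∃ e ∈ scc, pvNidx n e = j) →
      (scc.foldl (fun ids v => ids.set (pvNidx n v) i) ids).getD j (-1) = i := by
  intro scc
  induction scc with
  | nil => rintro ids _ ⟨e, he, _⟩; cases he
  | cons v vs ih =>
    rintro ids hj ⟨e, he, hne⟩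
    simp only [List.foldl_cons]
    by_cases hv : pvNidx n v = j
    · subst hv
      rcases pvAssign_cases n i (pvNidx n v) vs (ids.set (pvNidx n v) i) with h | h
      · rw [h, pvGetI_set_self hj i]
      · rw [h]
    · rcases List.mem_cons.mp he with h' | h'
      · subst h'; exact absurd hne hv
      · exact ih _ (by rw [List.length_set]; exact hj) ⟨e, h', hne⟩

theorem pvOuter_len (n : Nat) :
    ∀ (L : List (Int × List Int)) (ids : List Int),
      (L.foldl (fun ids p => p.2.foldl (fun ids v => ids.set (pvNidx n v) p.1) ids) ids).length
        = ids.length := by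
  intro L
  induction L with
  | nil => intro ids; rfl
  | cons p ps ih => intro ids; simp only [List.foldl_cons]; rw [ih, pvAssign_len]

theorem pvOuter_untouched (n : Nat) (j : Nat) :
    ∀ (L : List (Int × List Int)) (ids : List Int),
      (∀ p ∈ L, ∀ e ∈ p.2, pvNidx n e ≠ j) →
      (L.foldl (fun ids p => p.2.foldl (fun ids v => ids.set (pvNidx n v) p.1) ids) ids).getD j (-1)
        = ids.getD j (-1) := by
  intro L
  induction L with
  | nil => intro ids _; rfl
  | cons p ps ih =>
    intro ids h
    simp only [List.foldl_cons]
    rw [ih _ (fun q hq => h q (by simp [hq])), pvAssign_untouched n p.1 j p.2 ids (h p (by simp))]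

theorem pvOuter_ne0 (n : Nat) (j : Nat) :
    ∀ (L : List (Int × List Int)) (ids : List Int),
      (∀ p ∈ L, p.1 ≠ 0) → ids.getD j (-1) ≠ 0 →
      (L.foldl (fun ids p => p.2.foldl (fun ids v => ids.set (pvNidx n v) p.1) ids) ids).getD j (-1)
        ≠ 0 := by
  intro L
  induction L with
  | nil => intro ids _ h; exact h
  | cons p ps ih =>
    intro ids hL h
    simp only [List.foldl_cons]
    apply ih _ (fun q hq => hL q (by simp [hq]))
    rcases pvAssign_cases n p.1 j p.2 ids with hc | hc
    · rw [hc]; exact h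
    · rw [hc]; exact hL p (by simp)

-- the last element of the first pass's finish list, in the three forms the ports use it
theorem pvLast_rev (l : List Int) (h : l ≠ []) :
    ∃ ys a, l = ys ++ [a] ∧ l.reverse = a :: ys.reverse ∧ l.getD (l.length - 1) 0 = a := by
  rcases List.eq_nil_or_concat l with h' | ⟨ys, a, h'⟩
  · exact absurd h' h
  · have h'' : l = ys ++ [a] := by rw [h', List.concat_eq_append]
    refine ⟨ys, a, h'', by rw [h'']; simp, ?_⟩
    rw [h'']
    have hlen : (ys ++ [a]).length - 1 = ys.length := by simp
    rw [hlen, List.getD, List.getElem?_append_right (le_refl ys.length)]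
    simp

theorem pvFind_congr {p q : Nat → Bool} :
    ∀ (l : List Nat), (∀ x ∈ l, p x = q x) → l.find? p = l.find? q := by
  intro l
  induction l with
  | nil => intro _; rfl
  | cons x xs ih =>
    intro h
    simp only [List.find?_cons]
    rw [h x (by simp)]
    cases q x
    · exact ih (fun y hy => h y (by simp [hy]))
    · rfl

theorem pvBoolExt {a b : Bool} (h : a = true ↔ b = true) : a = b := by
  cases a <;> cases b <;> simp_all

-- dfs from vertex 0 finishes 0 last, so the head of the reversed finish order is 0
theorem pvTopoHead (sg : List (List Int)) :
    (((pvDfs (sg.length + 1) sg 0 (List.replicate sg.length false) []).2).reverse).getD 0 (-1)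
      = 0 := by
  rw [pvDfs]
  simp [List.getD]

-- facts about the first pass: visited has length n, every finished vertex normalises
-- below n, and (for nonempty graphs) the finish list is nonempty
theorem pvPass1_aux (g : List (List Int)) (hE : pvEdgesOk g) :
    ∀ (l : List Nat) (st : List Bool × List Int), (∀ v ∈ l, v < g.length) →
      st.1.length = g.length → (∀ e ∈ st.2, pvNidx g.length e < g.length) →
      (l.foldl (fun st v => if pvGetB st.1 v then st else pvDfs (g.length + 1) g (v : Int) st.1 st.2) st).1.length = g.length ∧
      (∀ e ∈ (l.foldl (fun st v => if pvGetB st.1 v then st else pvDfs (g.length + 1) g (v : Int) st.1 st.2) st).2,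
        pvNidx g.length e < g.length) ∧
      (∃ ex, (l.foldl (fun st v => if pvGetB st.1 v then st else pvDfs (g.length + 1) g (v : Int) st.1 st.2) st).2 = st.2 ++ ex) := by
  intro l
  induction l with
  | nil => intro st _ h1 h2; exact ⟨h1, h2, [], by simp⟩
  | cons v vs ih =>
    intro st hl hlen hout
    simp only [List.foldl_cons]
    by_cases hv : pvGetB st.1 v = true
    · rw [if_pos hv]
      exact ih st (fun x hx => hl x (by simp [hx])) hlen hout
    · rw [if_neg hv]
      have hv' : pvGetB st.1 v = false := by revert hv; cases pvGetB st.1 v <;> simp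
      have hvn : pvNidx g.length (v : Int) < g.length := by
        rw [pvNidx_natCast]; exact hl v (by simp)
      have hunvis : pvGetB st.1 (pvNidx g.length (v : Int)) = false := by
        rw [pvNidx_natCast]; exact hv'
      obtain ⟨ex, e1, e2, _, e4⟩ := pvDfs_S g hE (g.length + 1) (v : Int) st.1 st.2 hlen hvn hunvis
      have hst' : (∀ e ∈ (pvDfs (g.length + 1) g (v : Int) st.1 st.2).2,
          pvNidx g.length e < g.length) := by
        intro e he
        rw [e1] at he
        rcases List.mem_append.mp he with h' | h'
        · exact hout e h'
        · exact (e4 e h').2.1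
      obtain ⟨f1, f2, ex2, f3⟩ := ih _ (fun x hx => hl x (by simp [hx])) e2 hst'
      refine ⟨f1, f2, ?_⟩
      rw [f3, e1, List.append_assoc]
      exact ⟨ex ++ ex2, rfl⟩

theorem pvPass1_facts (g : List (List Int)) (hE : pvEdgesOk g) (hne : g ≠ []) :
    (∀ e ∈ (pvPass1 g).2, pvNidx g.length e < g.length) ∧ (pvPass1 g).2 ≠ [] := by
  obtain ⟨k, hk⟩ : ∃ k, g.length = k + 1 := by
    cases g with
    | nil => exact absurd rfl hne
    | cons x xs => exact ⟨xs.length, by simp⟩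
  unfold pvPass1
  have hrange : List.range g.length = 0 :: List.map Nat.succ (List.range k) := by
    rw [hk, List.range_succ_eq_map]
  rw [hrange]
  simp only [List.foldl_cons]
  rw [if_neg (by rw [pvGetB_replicate]; simp)]
  have hlen0 : (List.replicate g.length false).length = g.length := by simp
  have hvn : pvNidx g.length ((0 : Nat) : Int) < g.length := by
    rw [pvNidx_natCast]; omega
  have hunvis : pvGetB (List.replicate g.length false) (pvNidx g.length ((0 : Nat) : Int)) = false :=
    pvGetB_replicate _ _
  obtain ⟨ex, e1, e2, _, e4⟩ :=
    pvDfs_S g hE (g.length + 1) ((0 : Nat) : Int) (List.replicate g.length false) [] hlen0 hvn hunvis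
  have hne1 : (pvDfs (g.length + 1) g ((0 : Nat) : Int) (List.replicate g.length false) []).2 ≠ [] := by
    rw [pvDfs]
    simp
  have hout1 : ∀ e ∈ (pvDfs (g.length + 1) g ((0 : Nat) : Int) (List.replicate g.length false) []).2,
      pvNidx g.length e < g.length := by
    intro e he
    rw [e1] at he
    rcases List.mem_append.mp he with h' | h'
    · cases h'
    · exact (e4 e h').2.1
  have hmain := pvPass1_aux g hE ((List.range k).map Nat.succ)
    (pvDfs (g.length + 1) g ((0 : Nat) : Int) (List.replicate g.length false) [])
    (by intro v hv; simp only [List.mem_map, List.mem_range] at hv; obtain ⟨m, hm, rfl⟩ := hv; omega)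
    e2 hout1
  obtain ⟨_, f2, ex2, f3⟩ := hmain
  constructor
  · intro e he
    exact f2 e (by norm_num at he ⊢; exact he)
  · intro hcon
    norm_num at hcon f3
    rw [f3] at hcon
    rcases List.append_eq_nil_iff.mp hcon with ⟨h1, _⟩
    exact hne1 h1

-- the second pass after its first step: every later SCC is disjoint from the
-- vertices marked by the first (V0)
theorem pvSccsRest (g : List (List Int)) (hE : pvEdgesOk g) (V0 : List Bool) :
    ∀ (l : List Int) (st : List Bool × List (List Int)),
      (∀ v ∈ l, pvNidx g.length v < g.length) →
      st.1.length = g.length →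
      (∀ j, pvGetB V0 j = true → pvGetB st.1 j = true) →
      ∃ more, (l.foldl (fun (st : List Bool × List (List Int)) v =>
          if pvGetB st.1 (pvNidx g.length v) then st
          else
            let r := pvDfs (g.length + 1) (pvTranspose g) v st.1 []
            (r.1, st.2.concat r.2)) st).2 = st.2 ++ more ∧
        (∀ scc ∈ more, ∀ e ∈ scc, pvGetB V0 (pvNidx g.length e) = false) := by
  have htE := pvTranspose_EdgesOk g hE
  have htlen := pvTranspose_len g hE
  intro l
  induction l with
  | nil => intro st _ _ _; exact ⟨[], by simp, by simp⟩
  | cons v vs ih =>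
    intro st hl hlen hV0
    simp only [List.foldl_cons]
    by_cases hv : pvGetB st.1 (pvNidx g.length v) = true
    · rw [if_pos hv]
      exact ih st (fun x hx => hl x (by simp [hx])) hlen hV0
    · rw [if_neg hv]
      have hv' : pvGetB st.1 (pvNidx g.length v) = false := by
        revert hv; cases pvGetB st.1 (pvNidx g.length v) <;> simp
      have hvn : pvNidx (pvTranspose g).length v < (pvTranspose g).length := by
        rw [htlen]; exact hl v (by simp)
      have hlen' : st.1.length = (pvTranspose g).length := by rw [htlen]; exact hlen
      have hunvis : pvGetB st.1 (pvNidx (pvTranspose g).length v) = false := by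
        rw [htlen]; exact hv'
      obtain ⟨ex, e1, e2, e3, e4⟩ :=
        pvDfs_S (pvTranspose g) htE (g.length + 1) v st.1 [] hlen' hvn hunvis
      have hmark : ∀ j, pvGetB st.1 j = true →
          pvGetB (pvDfs (g.length + 1) (pvTranspose g) v st.1 []).1 j = true := by
        intro j hj; exact (e3 j).mpr (Or.inl hj)
      obtain ⟨more, m1, m2⟩ := ih
        ((pvDfs (g.length + 1) (pvTranspose g) v st.1 []).1,
          st.2.concat (pvDfs (g.length + 1) (pvTranspose g) v st.1 []).2)
        (fun x hx => hl x (by simp [hx]))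
        (by simpa [htlen] using e2)
        (fun j hj => hmark j (hV0 j hj))
      refine ⟨(pvDfs (g.length + 1) (pvTranspose g) v st.1 []).2 :: more, ?_, ?_⟩
      · rw [m1]
        simp [List.concat_eq_append]
      · intro scc hscc e he
        rcases List.mem_cons.mp hscc with h' | h'
        · subst h'
          rw [e1] at he
          simp only [List.nil_append] at he
          have hfalse := (e4 e he).1
          rw [htlen] at hfalse
          by_contra hcon
          have : pvGetB st.1 (pvNidx g.length e) = true := by
            apply hV0
            revert hcon; cases pvGetB V0 (pvNidx g.length e) <;> simp
          rw [this] at hfalse; cases hfalse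
        · exact m2 scc h' e he


-- characterisation of scc_ids after the two (identical) assignment passes:
-- an index below n carries id 0 exactly when it lies in V0 (the first SCC)
theorem pvIds_char (g : List (List Int)) (scc0 : List Int) (more : List (List Int))
    (V0 : List Bool)
    (hscc0 : ∀ j, pvGetB V0 j = true ↔ ∃ e ∈ scc0, pvNidx g.length e = j)
    (hdisj : ∀ scc ∈ more, ∀ e ∈ scc, pvGetB V0 (pvNidx g.length e) = false) :
    ∀ j, j < g.length →
      (((PySem.List.enumerate (scc0 :: more)).foldl
          (fun ids p => p.2.foldl (fun ids v => ids.set (pvNidx g.length v) p.1) ids)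
          ((PySem.List.enumerate (scc0 :: more)).foldl
            (fun ids p => p.2.foldl (fun ids v => ids.set (pvNidx g.length v) p.1) ids)
            (List.replicate g.length (-1)))).getD j (-1) = 0
        ↔ pvGetB V0 j = true) := by
  intro j hj
  have hL : PySem.List.enumerate (scc0 :: more) = ((0 : Int), scc0) :: PySem.List.enumerate more 1 := by
    rw [PySem.List.enumerate_cons]; norm_num
  have hmore0 : ∀ p ∈ PySem.List.enumerate more 1, p.1 ≠ (0 : Int) := by
    intro p hp
    obtain ⟨k, hk, rfl⟩ := (PySem.List.mem_enumerate_iff more 1 p).mp hp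
    simp; omega
  have hmoremem : ∀ p ∈ PySem.List.enumerate more 1, p.2 ∈ more := by
    intro p hp
    obtain ⟨k, hk, rfl⟩ := (PySem.List.mem_enumerate_iff more 1 p).mp hp
    exact List.getElem_mem hk
  by_cases hV : pvGetB V0 j = true
  · have hhit : ∃ e ∈ scc0, pvNidx g.length e = j := (hscc0 j).mp hV
    have huntouched : ∀ p ∈ PySem.List.enumerate more 1, ∀ e ∈ p.2, pvNidx g.length e ≠ j := by
      intro p hp e he heq
      have hd := hdisj p.2 (hmoremem p hp) e he
      rw [heq, hV] at hd; cases hd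
    have pass : ∀ ids : List Int, ids.length = g.length →
        ((((0 : Int), scc0) :: PySem.List.enumerate more 1).foldl
          (fun ids p => p.2.foldl (fun ids v => ids.set (pvNidx g.length v) p.1) ids) ids).getD j (-1)
          = 0 := by
      intro ids hlen
      simp only [List.foldl_cons]
      rw [pvOuter_untouched g.length j _ _ huntouched]
      exact pvAssign_self g.length 0 j scc0 ids (by rw [hlen]; exact hj) hhit
    rw [hL]
    rw [pass _ (by rw [pvOuter_len]; simp)]
    simp [hV]
  · have hmiss : ∀ e ∈ scc0, pvNidx g.length e ≠ j := by
      intro e he heq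
      exact hV ((hscc0 j).mpr ⟨e, he, heq⟩)
    have pass2 : ∀ ids : List Int, ids.getD j (-1) ≠ 0 →
        ((((0 : Int), scc0) :: PySem.List.enumerate more 1).foldl
          (fun ids p => p.2.foldl (fun ids v => ids.set (pvNidx g.length v) p.1) ids) ids).getD j (-1)
          ≠ 0 := by
      intro ids h0
      simp only [List.foldl_cons]
      apply pvOuter_ne0 g.length j _ _ hmore0
      rw [pvAssign_untouched g.length 0 j scc0 ids hmiss]
      exact h0
    rw [hL]
    have hne0 := pass2 _ (pass2 (List.replicate g.length (-1)) (by rw [pvGetI_replicate]; norm_num))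
    simp only [hne0, false_iff]
    exact hV

-- ===== VERDICT (by name: the statement is the Claim_ definition above) =====
theorem find_good_beginning_in_dag_spec : Claim_equal_find_good_beginning_in_dag := by
  intro g _hdom hpre
  obtain ⟨hne, hE'⟩ := hpre
  have hE : pvEdgesOk g := hE'
  unfold Spec_find_good_beginning_in_dag
  simp only [find_good_beginning_in_dag, find_good_beginning_in_dag_alt]
  obtain ⟨hpel, hpne⟩ := pvPass1_facts g hE hne
  obtain ⟨ys, a, hsplit, hrev, hlast⟩ := pvLast_rev (pvPass1 g).2 hpne
  have hmem_a : a ∈ (pvPass1 g).2 := by rw [hsplit]; simp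
  have hr0 : pvNidx g.length a < g.length := hpel a hmem_a
  have htE := pvTranspose_EdgesOk g hE
  have htlen := pvTranspose_len g hE
  -- the first SCC collected by get_sccs
  set V0 := (pvDfs (g.length + 1) (pvTranspose g) a (List.replicate g.length false) []).1 with hV0def
  set scc0 := (pvDfs (g.length + 1) (pvTranspose g) a (List.replicate g.length false) []).2 with hscc0def
  have hlen0 : (List.replicate g.length false).length = (pvTranspose g).length := by
    rw [htlen]; simp
  have hvn : pvNidx (pvTranspose g).length a < (pvTranspose g).length := by
    rw [htlen]; exact hr0
  have hunvis : pvGetB (List.replicate g.length false) (pvNidx (pvTranspose g).length a) = false :=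
    pvGetB_replicate _ _
  obtain ⟨ex, e1, e2, e3, _⟩ :=
    pvDfs_S (pvTranspose g) htE (g.length + 1) a (List.replicate g.length false) [] hlen0 hvn hunvis
  have hscc0 : ∀ j, pvGetB V0 j = true ↔ ∃ e ∈ scc0, pvNidx g.length e = j := by
    intro j
    rw [hV0def, e3 j, pvGetB_replicate]
    simp only [Bool.false_eq_true, false_or]
    rw [hscc0def, e1]
    simp only [List.nil_append]
    rw [htlen]
  have hV0closure : ∀ j, pvGetB V0 j = true ↔
      Relation.ReflTransGen (pvGStep (pvTranspose g)) (pvNidx (pvTranspose g).length a) j := by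
    intro j
    rw [hV0def, show List.replicate g.length false = List.replicate (pvTranspose g).length false by
      rw [htlen]]
    exact pvDfs_closure (pvTranspose g) htE (g.length + 1) a [] hvn (by omega) j
  have hswap : pvGStep (pvTranspose g) = Function.swap (pvGStep g) := by
    funext x y
    exact propext (pvGStep_transpose g hE x y)
  have hreach : ∀ j, pvGetB V0 j = true ↔
      Relation.ReflTransGen (pvGStep g) j (pvNidx g.length a) := by
    intro j
    rw [hV0closure j, hswap, htlen]
    exact Relation.reflTransGen_swap
  -- the remaining SCCs are disjoint from V0
  have hV0len : V0.length = g.length := by rw [hV0def, e2, htlen]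
  obtain ⟨more, m1, m2⟩ := pvSccsRest g hE V0 ys.reverse (V0, ([] : List (List Int)).concat scc0)
    (by
      intro v hv
      apply hpel
      rw [hsplit]
      simp only [List.mem_reverse] at hv
      simp [hv])
    hV0len
    (fun j hj => hj)
  have hgs : pvGetSccs g (pvPass1 g).2 = scc0 :: more := by
    unfold pvGetSccs
    rw [hrev]
    simp only [List.foldl_cons]
    rw [if_neg (by rw [pvGetB_replicate]; simp)]
    rw [← hV0def, ← hscc0def, m1]
    simp [List.concat_eq_append]
  -- scc_ids characterisation
  have hids := pvIds_char g scc0 more V0 hscc0 m2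
  -- B's fixpoint
  have hfix := pvFix_iff g (pvNidx g.length a) hr0
  -- rewrite both sides
  rw [hlast, hgs]
  rw [pvTopoHead]
  have hpr1 : (pvCreateSccGraph g
      ((PySem.List.enumerate (scc0 :: more)).foldl
        (fun ids p => p.2.foldl (fun ids v => ids.set (pvNidx g.length v) p.1) ids)
        (List.replicate g.length (-1))) (scc0 :: more)).1
      = (PySem.List.enumerate (scc0 :: more)).foldl
        (fun ids p => p.2.foldl (fun ids v => ids.set (pvNidx g.length v) p.1) ids)
        ((PySem.List.enumerate (scc0 :: more)).foldl
          (fun ids p => p.2.foldl (fun ids v => ids.set (pvNidx g.length v) p.1) ids)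
          (List.replicate g.length (-1))) := rfl
  rw [hpr1]
  have hpeq : ∀ v ∈ List.range g.length,
      (((PySem.List.enumerate (scc0 :: more)).foldl
          (fun ids p => p.2.foldl (fun ids v => ids.set (pvNidx g.length v) p.1) ids)
          ((PySem.List.enumerate (scc0 :: more)).foldl
            (fun ids p => p.2.foldl (fun ids v => ids.set (pvNidx g.length v) p.1) ids)
            (List.replicate g.length (-1)))).getD v (-1) == (0 : Int))
        = pvGetB (pvFixLoop g (g.length + 1)
            ((List.replicate g.length false).set (pvNidx g.length a) true)) v := by
    intro v hv
    have hvlt := List.mem_range.mp hv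
    apply pvBoolExt
    rw [beq_iff_eq, hids v hvlt, hreach v, ← hfix v]
  have hfind := pvFind_congr (List.range g.length) hpeq
  rw [hfind]
  have hBr0 : pvGetB (pvFixLoop g (g.length + 1)
      ((List.replicate g.length false).set (pvNidx g.length a) true)) (pvNidx g.length a) = true :=
    (hfix _).mpr Relation.ReflTransGen.refl
  cases hfo : (List.range g.length).find? (fun v => pvGetB (pvFixLoop g (g.length + 1)
      ((List.replicate g.length false).set (pvNidx g.length a) true)) v) with
  | none =>
    exfalso
    exact (List.find?_eq_none.mp hfo) (pvNidx g.length a) (List.mem_range.mpr hr0) hBr0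
  | some w => rfl
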